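-- pv_equiv track=rewrite | github.com/monserratdb/kanyewestt | T0/functions.py | verifica_regla_1
-- ===== SOURCE A (Python) =====
-- def verificar_alcance_bomba_vertical(tablero, coordenadas):
--     i = coordenadas[0]
--     j = coordenadas[1]
--     borde = len(tablero) - 1
--     alcance_vertical = 1 #parte siendo 1 porque considera el espacio donde está la bomba
--     if tablero[i][j] == "T" or tablero[i][j] == "-":
--         return 0
--     else:
--         arriba = True
--         abajo = True
--         while arriba:
--             if i == 0:
--                 arriba = False
--             else:
--                 i -= 1 #subí a la fila anterior
--                 if tablero[i][j] != "T":
--                     alcance_vertical += 1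
--                 else:
--                     arriba = False
--         i = coordenadas[0] #ahora revisa abajo pero de la coordenada inicial
--         while abajo:
--             if i == borde:
--                 abajo = False
--             else:
--                 i += 1 #baja a la fila siguiente
--                 if tablero[i][j] != "T":
--                     alcance_vertical += 1
--                 else:
--                     abajo = False
--     return alcance_vertical
--
-- def verificar_alcance_bomba_horizontal(tablero, coordenadas):
--     i = coordenadas[0]
--     j = coordenadas[1]
--     borde = len(tablero) - 1
--     alcance_horizontal = 0 #en vertical ya consideré a la celda donde está la bomba
--     if tablero[i][j] == "T" or tablero[i][j] == "-":
--         return 0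
--     else:
--         derecha = True
--         izquierda = True
--         while derecha:
--             if j == borde:
--                 derecha = False
--             else:
--                 j += 1 #reviso la posición de la derecha
--                 if tablero[i][j] != "T":
--                     alcance_horizontal += 1
--                 else:
--                     derecha = False
--         j = coordenadas[1] #ahora revisa izquierda pero de la coordenada incial
--         while izquierda:
--             if j == 0:
--                 izquierda = False
--             else:
--                 j -= 1 #reviso la posición de la izquierda
--                 if tablero[i][j] != "T":
--                     alcance_horizontal += 1
--                 else:
--                     izquierda = False
--     return alcance_horizontal
--
-- def verificar_alcance_bomba(tablero: list, coordenadas: tuple) -> int: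
--     horizontal = verificar_alcance_bomba_horizontal(tablero, coordenadas)
--     vertical = verificar_alcance_bomba_vertical(tablero, coordenadas)
--     alcance_total = horizontal + vertical
--     return alcance_total
--
-- def verifica_regla_1(tablero):
--     largo = len(tablero)
--     auxiliar = False
--     for i in range(largo):
--         for j in range(largo):
--             if tablero[i][j].isdigit() == True:
--                 coordenadas = (i,j)
--                 alcance = verificar_alcance_bomba(tablero, coordenadas)
--                 if int(tablero[i][j]) == alcance:
--                     auxiliar = True
--                 else:
--                     auxiliar
--             else:
--                 auxiliar
--     return auxiliar
-- ===== SOURCE B (Python) =====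
-- def _runs_before(cells):
--     # res[k] = length of the streak of consecutive non-"T" cells ending just before index k
--     res = []
--     streak = 0
--     for c in cells:
--         res.append(streak)
--         streak = streak + 1 if c != "T" else 0
--     return res
--
-- def verifica_regla_1(tablero):
--     n = len(tablero)
--     rows = [fila[:n] for fila in tablero]
--     cols = [[rows[i][j] for i in range(n)] for j in range(n)]
--     left = [_runs_before(r) for r in rows]
--     right = [_runs_before(r[::-1])[::-1] for r in rows]
--     up = [_runs_before(c) for c in cols]
--     down = [_runs_before(c[::-1])[::-1] for c in cols]
--     for i in range(n):
--         for j in range(n):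
--             c = rows[i][j]
--             if c.isdigit() and int(c) == 1 + left[i][j] + right[i][j] + up[j][i] + down[j][i]:
--                 return True
--     return False
-- ===== Notes on version B (the rewrite author's own statement) =====
-- stated objective: alternative
-- what changed: Replaces the per-digit-cell four-direction while-loop rescans with run-length tables (consecutive non-'T' streak before each cell, computed once per row/column and once per reversed row/column) followed by a single pass over the board.
import Mathlib
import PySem

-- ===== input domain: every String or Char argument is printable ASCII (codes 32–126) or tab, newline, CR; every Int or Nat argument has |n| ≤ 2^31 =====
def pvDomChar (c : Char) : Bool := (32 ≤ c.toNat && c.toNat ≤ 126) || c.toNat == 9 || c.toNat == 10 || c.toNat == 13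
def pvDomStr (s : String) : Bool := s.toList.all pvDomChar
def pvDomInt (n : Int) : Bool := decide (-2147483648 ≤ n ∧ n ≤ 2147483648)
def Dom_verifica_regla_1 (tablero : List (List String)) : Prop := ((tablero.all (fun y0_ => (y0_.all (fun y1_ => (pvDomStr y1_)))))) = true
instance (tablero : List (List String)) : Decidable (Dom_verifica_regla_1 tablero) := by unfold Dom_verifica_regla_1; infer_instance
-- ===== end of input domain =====

-- B replaces A's per-digit-cell four-direction while-loop rescans by run-length tables
-- computed once per row/column plus a single final pass (a different algorithm of similar
-- measured cost); equivalence is proved on boards whose rows all have at least len(tablero)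
-- columns (elsewhere the Python A raises IndexError).

-- ===== PORT A =====
-- tablero[i][j] (always in range under Pre_; total form with defaults)
def pvGet (t : List (List String)) (i j : Nat) : String := (t.getD i []).getD j ""

-- the 'arriba' while loop of verificar_alcance_bomba_vertical: recursion on i
def pvUp (t : List (List String)) (j : Nat) : Nat → Nat
  | 0 => 0
  | i + 1 => if pvGet t i j ≠ "T" then pvUp t j i + 1 else 0

-- the 'abajo' while loop: fuel = borde - i (steps left until the bottom edge)
def pvDown (t : List (List String)) (j : Nat) : Nat → Nat → Nat
  | 0, _ => 0
  | f + 1, i => if pvGet t (i + 1) j ≠ "T" then pvDown t j f (i + 1) + 1 else 0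

def verificar_alcance_bomba_vertical (t : List (List String)) (i j : Nat) : Nat :=
  let borde := t.length - 1
  if pvGet t i j = "T" ∨ pvGet t i j = "-" then 0
  else 1 + pvUp t j i + pvDown t j (borde - i) i

-- the 'derecha' while loop: fuel = borde - j
def pvRight (t : List (List String)) (i : Nat) : Nat → Nat → Nat
  | 0, _ => 0
  | f + 1, j => if pvGet t i (j + 1) ≠ "T" then pvRight t i f (j + 1) + 1 else 0

-- the 'izquierda' while loop: recursion on j
def pvLeft (t : List (List String)) (i : Nat) : Nat → Nat
  | 0 => 0
  | j + 1 => if pvGet t i j ≠ "T" then pvLeft t i j + 1 else 0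

def verificar_alcance_bomba_horizontal (t : List (List String)) (i j : Nat) : Nat :=
  let borde := t.length - 1
  if pvGet t i j = "T" ∨ pvGet t i j = "-" then 0
  else pvRight t i (borde - j) j + pvLeft t i j

def verificar_alcance_bomba (t : List (List String)) (i j : Nat) : Nat :=
  verificar_alcance_bomba_horizontal t i j + verificar_alcance_bomba_vertical t i j

def verifica_regla_1 (tablero : List (List String)) : Bool :=
  let largo := tablero.length
  (List.range largo).foldl (fun auxiliar i =>
    (List.range largo).foldl (fun auxiliar j =>
      if PySem.Str.strIsdigit (pvGet tablero i j) then
        if PySem.Int.ofStr? (pvGet tablero i j)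
            = some ((verificar_alcance_bomba tablero i j : Nat) : Int) then true
        else auxiliar
      else auxiliar) auxiliar) false

-- ===== PORT B =====
-- _runs_before: res[k] = length of the streak of consecutive non-"T" cells just before index k
def runsBefore (cells : List String) : List Nat :=
  (cells.foldl (fun (st : List Nat × Nat) c =>
      (st.1 ++ [st.2], if c ≠ "T" then st.2 + 1 else 0)) (([] : List Nat), 0)).1

-- table[i][j]
def pvTbl (m : List (List Nat)) (i j : Nat) : Nat := (m.getD i []).getD j 0

def verifica_regla_1_alt (tablero : List (List String)) : Bool :=
  let n := tablero.length
  let rows := tablero.map (fun fila => fila.take n)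
  let cols := (List.range n).map (fun j => (List.range n).map (fun i => pvGet rows i j))
  let left := rows.map runsBefore
  let right := rows.map (fun r => (runsBefore r.reverse).reverse)
  let up := cols.map runsBefore
  let down := cols.map (fun c => (runsBefore c.reverse).reverse)
  (List.range n).any (fun i => (List.range n).any (fun j =>
    let c := pvGet rows i j
    PySem.Str.strIsdigit c &&
      (PySem.Int.ofStr? c
        == some ((1 + pvTbl left i j + pvTbl right i j + pvTbl up j i + pvTbl down j i : Nat) : Int))))

-- ===== PRECONDITION & SPEC =====
-- Pre_ excludes exactly the boards with a row shorter than len(tablero): there the Python A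
-- raises IndexError (tablero[i][j] with j up to len(tablero)-1).
def Pre_verifica_regla_1 (tablero : List (List String)) : Prop :=
  ∀ fila ∈ tablero, tablero.length ≤ fila.length
instance (tablero : List (List String)) : Decidable (Pre_verifica_regla_1 tablero) := by
  unfold Pre_verifica_regla_1; infer_instance
def pvWitness_verifica_regla_1 : List (List String) := [["1", "T"], ["-", "2"]]

def Spec_verifica_regla_1 (tablero : List (List String)) (out : Bool) : Prop := out = verifica_regla_1_alt tablero
instance (tablero : List (List String)) (out : Bool) : Decidable (Spec_verifica_regla_1 tablero out) := by unfold Spec_verifica_regla_1; infer_instance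

-- ===== CLAIM (what is proved, stated in full; the proofs are below) =====
def Claim_equal_verifica_regla_1 : Prop := ∀ (tablero : List (List String)), Dom_verifica_regla_1 tablero → Pre_verifica_regla_1 tablero → Spec_verifica_regla_1 tablero (verifica_regla_1 tablero)

-- ===== LEMMAS AND PROOFS =====

-- the streak length just before index k, starting from seed s at index 0
def pvBefore (l : List String) (s : Nat) : Nat → Nat
  | 0 => s
  | k + 1 => if l.getD k "" ≠ "T" then pvBefore l s k + 1 else 0

theorem pvBefore_cons (c : String) (tl : List String) (s : Nat) :
    ∀ k, pvBefore (c :: tl) s (k + 1) = pvBefore tl (if c ≠ "T" then s + 1 else 0) k := by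
  intro k
  induction k with
  | zero => simp [pvBefore, List.getD]
  | succ k ih =>
      show (if (c :: tl).getD (k + 1) "" ≠ "T" then pvBefore (c :: tl) s (k + 1) + 1 else 0) = _
      simp only [ih, List.getD_cons_succ]
      rfl

theorem runsBefore_foldl (l : List String) :
    ∀ (acc : List Nat) (s : Nat),
      l.foldl (fun (st : List Nat × Nat) c =>
        (st.1 ++ [st.2], if c ≠ "T" then st.2 + 1 else 0)) (acc, s)
      = (acc ++ (List.range l.length).map (pvBefore l s), pvBefore l s l.length) := by
  induction l with
  | nil => intro acc s; simp [pvBefore]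
  | cons c tl ih =>
      intro acc s
      rw [List.foldl_cons, ih]
      have hmap : (List.range (tl.length + 1)).map (pvBefore (c :: tl) s)
          = s :: (List.range tl.length).map (pvBefore tl (if c ≠ "T" then s + 1 else 0)) := by
        rw [List.range_succ_eq_map, List.map_cons, List.map_map]
        refine congrArg₂ _ rfl (List.map_congr_left ?_)
        intro k _; exact pvBefore_cons c tl s k
      simp [hmap, pvBefore_cons]

theorem runsBefore_eq (l : List String) :
    runsBefore l = (List.range l.length).map (pvBefore l 0) := by
  unfold runsBefore
  rw [runsBefore_foldl l [] 0]
  simp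

theorem getD_map_range {β : Type} (n k : Nat) (f : Nat → β) (h : k < n) (d : β) :
    ((List.range n).map f).getD k d = f k := by
  simp [List.getD_eq_getElem?_getD, h]

theorem getD_runsBefore (l : List String) (k : Nat) (h : k < l.length) :
    (runsBefore l).getD k 0 = pvBefore l 0 k := by
  rw [runsBefore_eq]; exact getD_map_range _ _ _ h _

theorem getD_map {α β : Type} (l : List α) (f : α → β) (i : Nat) (h : i < l.length)
    (d : α) (d' : β) : (l.map f).getD i d' = f (l.getD i d) := by
  simp [List.getD_eq_getElem?_getD, h]

theorem getD_take {α : Type} (l : List α) (n j : Nat) (h : j < n) (d : α) :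
    (l.take n).getD j d = l.getD j d := by
  simp [List.getD_eq_getElem?_getD, h]

theorem getD_reverse {α : Type} (l : List α) (k : Nat) (h : k < l.length) (d : α) :
    l.reverse.getD k d = l.getD (l.length - 1 - k) d := by
  rw [List.getD_eq_getElem?_getD, List.getD_eq_getElem?_getD,
    List.getElem?_eq_getElem (by simpa using h), List.getElem?_eq_getElem (by omega),
    List.getElem_reverse]

-- A's four scans, expressed through pvBefore on a list that carries the scanned line
theorem pvLeft_eq (t : List (List String)) (i : Nat) (c : List String) (K : Nat)
    (hc : ∀ m < K, c.getD m "" = pvGet t i m) :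
    ∀ j, j ≤ K → pvLeft t i j = pvBefore c 0 j := by
  intro j
  induction j with
  | zero => intro _; rfl
  | succ j ih =>
      intro hj
      show (if pvGet t i j ≠ "T" then pvLeft t i j + 1 else 0) = _
      rw [ih (by omega)]
      show _ = (if c.getD j "" ≠ "T" then _ + 1 else 0)
      rw [hc j (by omega)]

theorem pvUp_eq (t : List (List String)) (j : Nat) (c : List String) (K : Nat)
    (hc : ∀ m < K, c.getD m "" = pvGet t m j) :
    ∀ i, i ≤ K → pvUp t j i = pvBefore c 0 i := by
  intro i
  induction i with
  | zero => intro _; rfl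
  | succ i ih =>
      intro hi
      show (if pvGet t i j ≠ "T" then pvUp t j i + 1 else 0) = _
      rw [ih (by omega)]
      show _ = (if c.getD i "" ≠ "T" then _ + 1 else 0)
      rw [hc i (by omega)]

theorem pvRight_eq (t : List (List String)) (i n : Nat) (c : List String)
    (hc : ∀ m < n, c.getD m "" = pvGet t i m) (hlen : c.length = n) :
    ∀ f j, j + f + 1 = n → pvRight t i f j = pvBefore c.reverse 0 f := by
  intro f
  induction f with
  | zero => intro j _; rfl
  | succ f ih =>
      intro j hj
      show (if pvGet t i (j + 1) ≠ "T" then pvRight t i f (j + 1) + 1 else 0) = _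
      rw [ih (j + 1) (by omega)]
      show _ = (if c.reverse.getD f "" ≠ "T" then _ + 1 else 0)
      rw [getD_reverse c f (by omega), hlen, show n - 1 - f = j + 1 by omega,
        hc (j + 1) (by omega)]

theorem pvDown_eq (t : List (List String)) (j n : Nat) (c : List String)
    (hc : ∀ m < n, c.getD m "" = pvGet t m j) (hlen : c.length = n) :
    ∀ f i, i + f + 1 = n → pvDown t j f i = pvBefore c.reverse 0 f := by
  intro f
  induction f with
  | zero => intro i _; rfl
  | succ f ih =>
      intro i hi
      show (if pvGet t (i + 1) j ≠ "T" then pvDown t j f (i + 1) + 1 else 0) = _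
      rw [ih (i + 1) (by omega)]
      show _ = (if c.reverse.getD f "" ≠ "T" then _ + 1 else 0)
      rw [getD_reverse c f (by omega), hlen, show n - 1 - f = i + 1 by omega,
        hc (i + 1) (by omega)]

-- strIsdigit rules out "T" and "-"
theorem not_T_of_isdigit (s : String) (h : PySem.Str.strIsdigit s = true) :
    ¬ (s = "T" ∨ s = "-") := by
  rintro (rfl | rfl) <;> exact absurd h (by decide)

-- cells of B's trimmed rows agree with A's cells
theorem pvGet_rows (t : List (List String)) (i j : Nat) (hi : i < t.length)
    (hj : j < t.length) :
    pvGet (t.map (fun fila => fila.take t.length)) i j = pvGet t i j := by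
  unfold pvGet
  rw [getD_map t _ i hi [] [], getD_take _ _ _ hj]

-- == on Option Int is decide of =
theorem pvBeqDecide (a b : Option Int) : (a == b) = decide (a = b) := by
  by_cases h : a = b <;> simp [h]

-- foldl with an or-shaped body is any
theorem foldl_or_any (p : Nat → Bool) :
    ∀ (l : List Nat) (a : Bool), l.foldl (fun acc x => acc || p x) a = (a || l.any p) := by
  intro l
  induction l with
  | nil => intro a; simp
  | cons x tl ih => intro a; simp [ih, Bool.or_assoc]

-- A as an `any` over the same index grid
theorem verifica_regla_1_eq_any (t : List (List String)) :
    verifica_regla_1 t = (List.range t.length).any (fun i => (List.range t.length).any (fun j =>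
      PySem.Str.strIsdigit (pvGet t i j) &&
        decide (PySem.Int.ofStr? (pvGet t i j)
          = some ((verificar_alcance_bomba t i j : Nat) : Int)))) := by
  simp only [verifica_regla_1]
  have hbody : ∀ i, (fun (auxiliar : Bool) j =>
        if PySem.Str.strIsdigit (pvGet t i j) then
          if PySem.Int.ofStr? (pvGet t i j)
              = some ((verificar_alcance_bomba t i j : Nat) : Int) then true
          else auxiliar
        else auxiliar)
      = (fun (acc : Bool) j => acc ||
          (PySem.Str.strIsdigit (pvGet t i j) &&
            decide (PySem.Int.ofStr? (pvGet t i j)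
              = some ((verificar_alcance_bomba t i j : Nat) : Int)))) := by
    intro i
    funext acc j
    by_cases hd : PySem.Str.strIsdigit (pvGet t i j) = true
    · by_cases he : PySem.Int.ofStr? (pvGet t i j)
          = some ((verificar_alcance_bomba t i j : Nat) : Int)
      · rw [if_pos hd, if_pos he, hd, decide_eq_true he]; simp
      · rw [if_pos hd, if_neg he, hd, decide_eq_false he]; simp
    · have hd' : PySem.Str.strIsdigit (pvGet t i j) = false := by
        rwa [Bool.not_eq_true] at hd
      rw [if_neg hd, hd']; simp
  have hinner : ∀ i (a : Bool),
      (List.range t.length).foldl (fun auxiliar j =>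
        if PySem.Str.strIsdigit (pvGet t i j) then
          if PySem.Int.ofStr? (pvGet t i j)
              = some ((verificar_alcance_bomba t i j : Nat) : Int) then true
          else auxiliar
        else auxiliar) a
      = (a || (List.range t.length).any (fun j =>
          PySem.Str.strIsdigit (pvGet t i j) &&
            decide (PySem.Int.ofStr? (pvGet t i j)
              = some ((verificar_alcance_bomba t i j : Nat) : Int)))) := by
    intro i a
    rw [hbody i, foldl_or_any]
  rw [show (fun (auxiliar : Bool) i =>
      (List.range t.length).foldl (fun auxiliar j =>
        if PySem.Str.strIsdigit (pvGet t i j) then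
          if PySem.Int.ofStr? (pvGet t i j)
              = some ((verificar_alcance_bomba t i j : Nat) : Int) then true
          else auxiliar
        else auxiliar) auxiliar)
    = (fun (acc : Bool) i => acc || (List.range t.length).any (fun j =>
        PySem.Str.strIsdigit (pvGet t i j) &&
          decide (PySem.Int.ofStr? (pvGet t i j)
            = some ((verificar_alcance_bomba t i j : Nat) : Int)))) from
      funext fun acc => funext fun i => hinner i acc, foldl_or_any, Bool.false_or]

-- the pointwise agreement of the two per-cell tests, under Pre_
theorem cell_eq (t : List (List String)) (hPre : Pre_verifica_regla_1 t)
    (i j : Nat) (hi : i < t.length) (hj : j < t.length) :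
    (PySem.Str.strIsdigit (pvGet t i j) &&
      decide (PySem.Int.ofStr? (pvGet t i j)
        = some ((verificar_alcance_bomba t i j : Nat) : Int)))
    = (PySem.Str.strIsdigit (pvGet (t.map (fun fila => fila.take t.length)) i j) &&
      (PySem.Int.ofStr? (pvGet (t.map (fun fila => fila.take t.length)) i j)
        == some ((1
          + pvTbl ((t.map (fun fila => fila.take t.length)).map runsBefore) i j
          + pvTbl ((t.map (fun fila => fila.take t.length)).map
              (fun r => (runsBefore r.reverse).reverse)) i j
          + pvTbl (((List.range t.length).map (fun j => (List.range t.length).map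
              (fun i => pvGet (t.map (fun fila => fila.take t.length)) i j))).map runsBefore) j i
          + pvTbl (((List.range t.length).map (fun j => (List.range t.length).map
              (fun i => pvGet (t.map (fun fila => fila.take t.length)) i j))).map
              (fun c => (runsBefore c.reverse).reverse)) j i : Nat) : Int))) := by
  rw [pvGet_rows t i j hi hj]
  by_cases hd : PySem.Str.strIsdigit (pvGet t i j) = true
  · -- the row of t at i, trimmed to t.length entries, and the j-th column of the trimmed board
    have hrowlen : t.length ≤ (t.getD i []).length := by
      have h1 : t.getD i [] = t[i] := by
        rw [List.getD_eq_getElem?_getD, List.getElem?_eq_getElem hi]; rfl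
      rw [h1]; exact hPre _ (List.getElem_mem hi)
    have hRlen : ((t.getD i []).take t.length).length = t.length := by
      rw [List.length_take]; omega
    have hRget : ∀ m < t.length, ((t.getD i []).take t.length).getD m "" = pvGet t i m := by
      intro m hm; exact getD_take _ _ _ hm _
    have hClen : ((List.range t.length).map (fun i' =>
        pvGet (t.map (fun fila => fila.take t.length)) i' j)).length = t.length := by simp
    have hCget : ∀ m < t.length, ((List.range t.length).map (fun i' =>
        pvGet (t.map (fun fila => fila.take t.length)) i' j)).getD m "" = pvGet t m j := by
      intro m hm
      rw [getD_map_range t.length m _ hm]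
      exact pvGet_rows t m j hm hj
    -- the four table entries
    have hleft : pvTbl ((t.map (fun fila => fila.take t.length)).map runsBefore) i j
        = pvBefore ((t.getD i []).take t.length) 0 j := by
      unfold pvTbl
      rw [getD_map _ runsBefore i (by simpa using hi) [] [], getD_map t _ i hi [] [],
        getD_runsBefore _ j (by rw [hRlen]; omega)]
    have hright : pvTbl ((t.map (fun fila => fila.take t.length)).map
          (fun r => (runsBefore r.reverse).reverse)) i j
        = pvBefore ((t.getD i []).take t.length).reverse 0 (t.length - 1 - j) := by
      unfold pvTbl
      rw [getD_map _ _ i (by simpa using hi) [] [], getD_map t _ i hi [] []]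
      have hlen1 : (runsBefore ((t.getD i []).take t.length).reverse).length = t.length := by
        rw [runsBefore_eq]
        simp only [List.length_map, List.length_range, List.length_reverse, hRlen]
      rw [getD_reverse _ j (by rw [hlen1]; omega), hlen1,
        getD_runsBefore _ _ (by rw [List.length_reverse, hRlen]; omega)]
    have hup : pvTbl ((((List.range t.length).map (fun j => (List.range t.length).map
          (fun i => pvGet (t.map (fun fila => fila.take t.length)) i j)))).map runsBefore) j i
        = pvBefore ((List.range t.length).map (fun i' =>
            pvGet (t.map (fun fila => fila.take t.length)) i' j)) 0 i := by
      unfold pvTbl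
      rw [getD_map _ runsBefore j (by simpa using hj) [] [], getD_map_range t.length j _ hj,
        getD_runsBefore _ i (by rw [hClen]; omega)]
    have hdown : pvTbl ((((List.range t.length).map (fun j => (List.range t.length).map
          (fun i => pvGet (t.map (fun fila => fila.take t.length)) i j)))).map
          (fun c => (runsBefore c.reverse).reverse)) j i
        = pvBefore ((List.range t.length).map (fun i' =>
            pvGet (t.map (fun fila => fila.take t.length)) i' j)).reverse 0
            (t.length - 1 - i) := by
      unfold pvTbl
      rw [getD_map _ _ j (by simpa using hj) [] [], getD_map_range t.length j _ hj]
      have hlen2 : (runsBefore ((List.range t.length).map (fun i' =>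
          pvGet (t.map (fun fila => fila.take t.length)) i' j)).reverse).length
          = t.length := by
        rw [runsBefore_eq]
        simp only [List.length_map, List.length_range, List.length_reverse]
      rw [getD_reverse _ i (by rw [hlen2]; omega), hlen2,
        getD_runsBefore _ _ (by rw [List.length_reverse, hClen]; omega)]
    -- A's alcance equals B's table sum
    have hnTm : ¬ (pvGet t i j = "T" ∨ pvGet t i j = "-") := not_T_of_isdigit _ hd
    have halc : verificar_alcance_bomba t i j
        = 1 + pvTbl ((t.map (fun fila => fila.take t.length)).map runsBefore) i j
          + pvTbl ((t.map (fun fila => fila.take t.length)).map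
              (fun r => (runsBefore r.reverse).reverse)) i j
          + pvTbl ((((List.range t.length).map (fun j => (List.range t.length).map
              (fun i => pvGet (t.map (fun fila => fila.take t.length)) i j)))).map
              runsBefore) j i
          + pvTbl ((((List.range t.length).map (fun j => (List.range t.length).map
              (fun i => pvGet (t.map (fun fila => fila.take t.length)) i j)))).map
              (fun c => (runsBefore c.reverse).reverse)) j i := by
      simp only [verificar_alcance_bomba, verificar_alcance_bomba_horizontal,
        verificar_alcance_bomba_vertical, if_neg hnTm]
      rw [hleft, hright, hup, hdown,
        pvRight_eq t i t.length ((t.getD i []).take t.length) hRget hRlen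
          (t.length - 1 - j) j (by omega),
        pvLeft_eq t i ((t.getD i []).take t.length) t.length hRget j (by omega),
        pvUp_eq t j ((List.range t.length).map (fun i' =>
          pvGet (t.map (fun fila => fila.take t.length)) i' j)) t.length hCget i (by omega),
        pvDown_eq t j t.length ((List.range t.length).map (fun i' =>
          pvGet (t.map (fun fila => fila.take t.length)) i' j)) hCget hClen
          (t.length - 1 - i) i (by omega)]
      omega
    rw [halc, pvBeqDecide]
  · have hd' : PySem.Str.strIsdigit (pvGet t i j) = false := by
      rwa [Bool.not_eq_true] at hd
    rw [hd']
    simp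

-- ===== VERDICT (by name: the statement is the Claim_ definition above) =====
theorem verifica_regla_1_spec : Claim_equal_verifica_regla_1 := by
  intro t _ hPre
  unfold Spec_verifica_regla_1
  rw [verifica_regla_1_eq_any]
  simp only [verifica_regla_1_alt]
  refine PySem.List.any_congr_mem (fun i hi => ?_)
  refine PySem.List.any_congr_mem (fun j hj => ?_)
  exact cell_eq t hPre i j (List.mem_range.mp hi) (List.mem_range.mp hj)
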